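-- pv_equiv track=rewrite | github.com/HelWireless/flai_agent | src/dialogue_query.py | _process_query_results
-- ===== SOURCE A (Python) =====
-- def _process_query_results(query_results, if_pillow=True):
--     processed_results = []
--     temp_dict = {}
--
--     for query_result in query_results:
--         user_msg = query_result[0]
--         assistant_msg = query_result[1]
--         timestamp = query_result[2]
--
--         if timestamp not in temp_dict:
--             temp_dict[timestamp] = {"user": "", "assistant": ""}
--
--         if user_msg:
--             temp_dict[timestamp]["user"] = user_msg
--         if assistant_msg:
--             if temp_dict[timestamp]["assistant"]:
--                 temp_dict[timestamp]["assistant"] += " " + assistant_msg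
--             else:
--                 temp_dict[timestamp]["assistant"] = assistant_msg
--
--
--     # 按照 timestamp 排序并取最近的 6 条对话
--     sorted_keys = sorted(temp_dict.keys(), reverse=if_pillow)
--     for key in sorted_keys[:6]:
--         if temp_dict[key]["user"]:
--             processed_results.append({"role": "user", "content": temp_dict[key]["user"]})
--         if temp_dict[key]["assistant"]:
--             processed_results.append({"role": "assistant", "content": temp_dict[key]["assistant"]})
--
--     return processed_results
-- ===== SOURCE B (Python) =====
-- def _process_query_results(query_results, if_pillow=True):
--     # No grouping dict: pick the 6 candidate timestamps first from the distinct
--     # set, then rescan the input once per picked timestamp (at most 6 rescans).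
--     picked = sorted({row[2] for row in query_results}, reverse=bool(if_pillow))[:6]
--     out = []
--     for key in picked:
--         user = ""
--         parts = []
--         for user_msg, assistant_msg, timestamp in query_results:
--             if timestamp == key:
--                 if user_msg:
--                     user = user_msg
--                 if assistant_msg:
--                     parts.append(assistant_msg)
--         if user:
--             out.append({"role": "user", "content": user})
--         if parts:
--             out.append({"role": "assistant", "content": " ".join(parts)})
--     return out
-- ===== Notes on version B (the rewrite author's own statement) =====
-- stated objective: alternative
-- what changed: B drops A's grouping dict entirely: it first selects the up-to-6 candidate timestamps by sorting the distinct timestamp set (descending/ascending per if_pillow) and then rescans the whole input once per picked timestamp to accumulate that key's last non-empty user and space-joined assistants, instead of A's one-pass mutation of nested role dicts followed by a full-key sort.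
import Mathlib
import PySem

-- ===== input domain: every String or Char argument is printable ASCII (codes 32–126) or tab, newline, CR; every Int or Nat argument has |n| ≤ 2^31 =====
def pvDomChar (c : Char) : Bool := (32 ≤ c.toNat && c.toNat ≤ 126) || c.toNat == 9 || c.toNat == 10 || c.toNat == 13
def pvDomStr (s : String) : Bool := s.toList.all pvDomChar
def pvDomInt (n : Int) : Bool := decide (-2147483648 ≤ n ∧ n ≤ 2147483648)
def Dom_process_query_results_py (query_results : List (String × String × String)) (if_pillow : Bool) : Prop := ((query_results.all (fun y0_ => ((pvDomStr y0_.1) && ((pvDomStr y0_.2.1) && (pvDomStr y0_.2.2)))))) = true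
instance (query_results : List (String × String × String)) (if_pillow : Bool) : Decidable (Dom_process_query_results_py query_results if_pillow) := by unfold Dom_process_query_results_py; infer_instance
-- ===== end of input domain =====

-- B drops A's grouping dict: it sorts the distinct timestamp set, takes the first 6, and
-- rescans the input once per picked timestamp — an alternative algorithm, not claimed faster.

-- ===== PORT A =====
-- loop body of A's grouping 'for query_result in query_results:' (nested role dicts, mutated in place)
def pqrStepA (temp : PySem.Dict String (PySem.Dict String String)) (q : String × String × String) :
    PySem.Dict String (PySem.Dict String String) :=
  let user_msg := q.1
  let assistant_msg := q.2.1
  let timestamp := q.2.2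
  -- if timestamp not in temp_dict: temp_dict[timestamp] = {"user": "", "assistant": ""}
  let temp := if !temp.contains timestamp then
                temp.insert timestamp (PySem.Dict.ofList [("user", ""), ("assistant", "")])
              else temp
  -- if user_msg: temp_dict[timestamp]["user"] = user_msg
  let temp := if user_msg ≠ "" then
                temp.modify timestamp PySem.Dict.empty (fun d => d.insert "user" user_msg)
              else temp
  -- if assistant_msg: append with " " to a nonempty field, else set it
  let temp := if assistant_msg ≠ "" then
                temp.modify timestamp PySem.Dict.empty (fun d =>
                  if d.getD "assistant" "" ≠ "" then
                    d.insert "assistant" (d.getD "assistant" "" ++ " " ++ assistant_msg)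
                  else d.insert "assistant" assistant_msg)
              else temp
  temp

def process_query_results_py (query_results : List (String × String × String)) (if_pillow : Bool) :
    List (List (String × String)) :=
  let temp_dict := query_results.foldl pqrStepA PySem.Dict.empty
  let sorted_keys := PySem.List.sorted temp_dict.keys (fun x => x) if_pillow
  (sorted_keys.take 6).foldl (fun processed_results key =>
    let d := temp_dict.getD key PySem.Dict.empty
    let processed_results :=
      if d.getD "user" "" ≠ "" then processed_results ++ [[("role", "user"), ("content", d.getD "user" "")]]
      else processed_results
    if d.getD "assistant" "" ≠ "" then processed_results ++ [[("role", "assistant"), ("content", d.getD "assistant" "")]]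
    else processed_results) []

-- ===== PORT B =====
-- B's inner rescan body: 'for user_msg, assistant_msg, timestamp in query_results: if timestamp == key: …'
def pqrScanStep (key : String) (st : String × List String) (q : String × String × String) :
    String × List String :=
  if q.2.2 = key then
    ((if q.1 ≠ "" then q.1 else st.1), (if q.2.1 ≠ "" then st.2 ++ [q.2.1] else st.2))
  else st

def process_query_results_py_alt (query_results : List (String × String × String)) (if_pillow : Bool) :
    List (List (String × String)) :=
  -- picked = sorted({row[2] for row in query_results}, reverse=if_pillow)[:6]
  let picked := (PySem.List.sorted (PySem.Set.ofList (query_results.map (fun q => q.2.2)))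
                  (fun x => x) if_pillow).take 6
  picked.foldl (fun out key =>
    let v := query_results.foldl (pqrScanStep key) ("", [])
    let out := if v.1 ≠ "" then out ++ [[("role", "user"), ("content", v.1)]] else out
    if v.2 ≠ [] then out ++ [[("role", "assistant"), ("content", PySem.Str.join " " v.2)]] else out) []

-- ===== PRECONDITION & SPEC =====
def Spec_process_query_results_py (query_results : List (String × String × String)) (if_pillow : Bool) (out : List (List (String × String))) : Prop := out = process_query_results_py_alt query_results if_pillow
instance (query_results : List (String × String × String)) (if_pillow : Bool) (out : List (List (String × String))) : Decidable (Spec_process_query_results_py query_results if_pillow out) := by unfold Spec_process_query_results_py; infer_instance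

-- ===== CLAIM (what is proved, stated in full; the proofs are below) =====
def Claim_equal_process_query_results_py : Prop := ∀ (query_results : List (String × String × String)) (if_pillow : Bool), Dom_process_query_results_py query_results if_pillow → Spec_process_query_results_py query_results if_pillow (process_query_results_py query_results if_pillow)

-- ===== LEMMAS AND PROOFS =====

-- " ".join facts, proved on the List Char side
theorem pqr_join_nil : PySem.Str.join " " [] = "" := rfl

theorem pqr_join_singleton (a : String) : PySem.Str.join " " [a] = a := by
  apply String.toList_inj.mp
  rw [PySem.Str.toList_join]
  simp [PySem.Chars.join_singleton]

theorem pqr_chars_join_append_singleton (sep c : List Char) (l : List (List Char)) (h : l ≠ []) :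
    PySem.Chars.join sep (l ++ [c]) = PySem.Chars.join sep l ++ sep ++ c := by
  induction l with
  | nil => simp at h
  | cons p rest ih =>
    cases rest with
    | nil =>
      show PySem.Chars.join sep [p, c] = PySem.Chars.join sep [p] ++ sep ++ c
      rw [PySem.Chars.join_cons_cons, PySem.Chars.join_singleton, PySem.Chars.join_singleton]
    | cons q rest' =>
      have hrw := ih (by simp)
      simp only [List.cons_append, PySem.Chars.join_cons_cons] at hrw ⊢
      rw [hrw]
      simp [List.append_assoc]

theorem pqr_join_append_singleton (parts : List String) (a : String) (h : parts ≠ []) :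
    PySem.Str.join " " (parts ++ [a]) = PySem.Str.join " " parts ++ " " ++ a := by
  apply String.toList_inj.mp
  have hne : parts.map String.toList ≠ [] := by simpa using h
  simp only [String.toList_append, PySem.Str.toList_join, List.map_append, List.map_cons, List.map_nil]
  exact pqr_chars_join_append_singleton _ _ _ hne

theorem pqr_join_ne_empty (parts : List String) (h : parts ≠ []) (hall : ∀ s ∈ parts, s ≠ "") :
    PySem.Str.join " " parts ≠ "" := by
  intro hcontra
  have hl : (PySem.Str.join " " parts).toList = [] := by rw [hcontra]; rfl
  rw [PySem.Str.toList_join] at hl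
  cases parts with
  | nil => exact h rfl
  | cons p rest =>
    cases rest with
    | nil =>
      have hp : p.toList = String.toList "" := by
        simpa [PySem.Chars.join_singleton] using hl
      exact hall p (by simp) (String.toList_inj.mp hp)
    | cons q rest' =>
      simp only [List.map_cons, PySem.Chars.join_cons_cons] at hl
      simp at hl

-- the relation between A's inner role dict and B's (user, parts) scan state
def pqrValRel (dI : PySem.Dict String String) (v : String × List String) : Prop :=
  dI.getD "user" "" = v.1 ∧ dI.getD "assistant" "" = PySem.Str.join " " v.2

-- the net effect of A's two conditional in-place updates on one inner role dict
def pqrInnerVal (dI : PySem.Dict String String) (u a : String) : PySem.Dict String String :=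
  let dI1 := if u ≠ "" then dI.insert "user" u else dI
  if a ≠ "" then
    (if dI1.getD "assistant" "" ≠ "" then dI1.insert "assistant" (dI1.getD "assistant" "" ++ " " ++ a)
     else dI1.insert "assistant" a)
  else dI1

theorem pqr_cmod_spec (T : PySem.Dict String (PySem.Dict String String)) (c : Prop) [Decidable c]
    (ts : String) (f : PySem.Dict String String → PySem.Dict String String) (hc : T.contains ts = true) :
    ((if c then T.modify ts PySem.Dict.empty f else T).keys = T.keys) ∧
    (∀ k, k ≠ ts → (if c then T.modify ts PySem.Dict.empty f else T).getD k PySem.Dict.empty = T.getD k PySem.Dict.empty) ∧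
    ((if c then T.modify ts PySem.Dict.empty f else T).getD ts PySem.Dict.empty =
      if c then f (T.getD ts PySem.Dict.empty) else T.getD ts PySem.Dict.empty) ∧
    ((if c then T.modify ts PySem.Dict.empty f else T).contains ts = true) := by
  by_cases h : c
  · simp only [if_pos h]
    refine ⟨?_, ?_, ?_, ?_⟩
    · rw [PySem.Dict.keys_modify]
      exact PySem.Dict.keys_insert_of_contains _ _ hc
    · intro k hk
      rw [PySem.Dict.getD_modify, if_neg hk]
    · rw [PySem.Dict.getD_modify, if_pos rfl]
    · rw [PySem.Dict.contains_modify]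
      simp
  · exact ⟨by rw [if_neg h], fun k hk => by rw [if_neg h], by rw [if_neg h, if_neg h], by rw [if_neg h]; exact hc⟩

theorem pqrStepA_spec (dA : PySem.Dict String (PySem.Dict String String)) (u a ts : String) :
    (pqrStepA dA (u, a, ts)).keys = (if dA.contains ts = true then dA.keys else dA.keys ++ [ts]) ∧
    (∀ k, k ≠ ts → (pqrStepA dA (u, a, ts)).getD k PySem.Dict.empty = dA.getD k PySem.Dict.empty) ∧
    (pqrStepA dA (u, a, ts)).getD ts PySem.Dict.empty =
      pqrInnerVal (if dA.contains ts = true then dA.getD ts PySem.Dict.empty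
                   else PySem.Dict.ofList [("user", ""), ("assistant", "")]) u a := by
  have hstage1 :
      ((if !dA.contains ts then dA.insert ts (PySem.Dict.ofList [("user", ""), ("assistant", "")]) else dA).keys
          = (if dA.contains ts = true then dA.keys else dA.keys ++ [ts])) ∧
      (∀ k, k ≠ ts → (if !dA.contains ts then dA.insert ts (PySem.Dict.ofList [("user", ""), ("assistant", "")]) else dA).getD k PySem.Dict.empty = dA.getD k PySem.Dict.empty) ∧
      ((if !dA.contains ts then dA.insert ts (PySem.Dict.ofList [("user", ""), ("assistant", "")]) else dA).getD ts PySem.Dict.empty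
          = (if dA.contains ts = true then dA.getD ts PySem.Dict.empty else PySem.Dict.ofList [("user", ""), ("assistant", "")])) ∧
      ((if !dA.contains ts then dA.insert ts (PySem.Dict.ofList [("user", ""), ("assistant", "")]) else dA).contains ts = true) := by
    cases hA : dA.contains ts with
    | false =>
      refine ⟨by simp [PySem.Dict.keys_insert_of_not_contains _ _ hA], ?_, ?_, ?_⟩
      · intro k hk
        simp only [Bool.not_false, if_true]
        rw [PySem.Dict.getD_insert, if_neg hk]
      · simp only [Bool.not_false, if_true, Bool.false_eq_true, if_false]
        rw [PySem.Dict.getD_insert, if_pos rfl]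
      · simp only [Bool.not_false, if_true]
        exact PySem.Dict.contains_insert_self _ _ _
    | true =>
      simp [hA]
  set T1 := (if !dA.contains ts then dA.insert ts (PySem.Dict.ofList [("user", ""), ("assistant", "")]) else dA) with hT1
  obtain ⟨k1, g1, v1, c1⟩ := hstage1
  obtain ⟨k2, g2, v2, c2⟩ := pqr_cmod_spec T1 (u ≠ "") ts (fun d => d.insert "user" u) c1
  set T2 := (if u ≠ "" then T1.modify ts PySem.Dict.empty (fun d => d.insert "user" u) else T1) with hT2
  obtain ⟨k3, g3, v3, _⟩ := pqr_cmod_spec T2 (a ≠ "") ts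
    (fun d => if d.getD "assistant" "" ≠ "" then d.insert "assistant" (d.getD "assistant" "" ++ " " ++ a)
              else d.insert "assistant" a) c2
  have hstep : pqrStepA dA (u, a, ts) =
      (if a ≠ "" then T2.modify ts PySem.Dict.empty (fun d =>
          if d.getD "assistant" "" ≠ "" then d.insert "assistant" (d.getD "assistant" "" ++ " " ++ a)
          else d.insert "assistant" a) else T2) := rfl
  refine ⟨?_, ?_, ?_⟩
  · rw [hstep, k3, k2, k1]
  · intro k hk
    rw [hstep, g3 k hk, g2 k hk, g1 k hk]
  · rw [hstep, v3, v2, v1, pqrInnerVal]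

theorem pqrInnerVal_rel (dI : PySem.Dict String String) (v : String × List String) (u a : String)
    (hrel : pqrValRel dI v) (hinv : ∀ s ∈ v.2, s ≠ "") :
    pqrValRel (pqrInnerVal dI u a)
      ((if u ≠ "" then u else v.1), (if a ≠ "" then v.2 ++ [a] else v.2)) := by
  obtain ⟨h1, h2⟩ := hrel
  have hiff : (PySem.Str.join " " v.2 ≠ "") ↔ v.2 ≠ [] :=
    ⟨fun h hc => h (by rw [hc]; exact pqr_join_nil), fun h => pqr_join_ne_empty _ h hinv⟩
  unfold pqrInnerVal
  set dI1 := (if u ≠ "" then dI.insert "user" u else dI) with hdI1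
  have hd1u : dI1.getD "user" "" = (if u ≠ "" then u else v.1) := by
    by_cases hu : u ≠ ""
    · rw [hdI1, if_pos hu, if_pos hu, PySem.Dict.getD_insert, if_pos rfl]
    · rw [hdI1, if_neg hu, if_neg hu]; exact h1
  have hd1a : dI1.getD "assistant" "" = PySem.Str.join " " v.2 := by
    by_cases hu : u ≠ ""
    · rw [hdI1, if_pos hu, PySem.Dict.getD_insert,
        if_neg (by decide : ¬ ("assistant" : String) = "user")]
      exact h2
    · rw [hdI1, if_neg hu]; exact h2
  constructor
  · -- user field
    change _ = (if u ≠ "" then u else v.1)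
    by_cases ha : a ≠ ""
    · rw [if_pos ha]
      by_cases hc : dI1.getD "assistant" "" ≠ ""
      · rw [if_pos hc, PySem.Dict.getD_insert, if_neg (by decide : ¬ ("user" : String) = "assistant")]
        exact hd1u
      · rw [if_neg hc, PySem.Dict.getD_insert, if_neg (by decide : ¬ ("user" : String) = "assistant")]
        exact hd1u
    · rw [if_neg ha]; exact hd1u
  · -- assistant field
    change _ = PySem.Str.join " " (if a ≠ "" then v.2 ++ [a] else v.2)
    by_cases ha : a ≠ ""
    · rw [if_pos ha, if_pos ha]
      by_cases h0 : v.2 = []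
      · rw [if_neg (by rw [hd1a, h0]; simp [pqr_join_nil])]
        rw [PySem.Dict.getD_insert, if_pos rfl, h0]
        exact (pqr_join_singleton a).symm
      · rw [if_pos (by rw [hd1a]; exact hiff.mpr h0)]
        rw [PySem.Dict.getD_insert, if_pos rfl, hd1a, pqr_join_append_singleton v.2 a h0]
    · rw [if_neg ha, if_neg ha, hd1a]

-- one loop step preserves the A-dict ↔ per-key-scan relation
theorem pqr_step_pres (dA : PySem.Dict String (PySem.Dict String String))
    (σ : String → String × List String) (q : String × String × String)
    (hrel : ∀ k, pqrValRel (dA.getD k PySem.Dict.empty) (σ k))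
    (hinv : ∀ k, ∀ s ∈ (σ k).2, s ≠ "")
    (hfresh : ∀ k, dA.contains k = false → σ k = ("", [])) :
    ((pqrStepA dA q).keys = PySem.Set.add dA.keys q.2.2) ∧
    (∀ k, pqrValRel ((pqrStepA dA q).getD k PySem.Dict.empty) (pqrScanStep k (σ k) q)) ∧
    (∀ k, ∀ s ∈ (pqrScanStep k (σ k) q).2, s ≠ "") ∧
    (∀ k, (pqrStepA dA q).contains k = false → pqrScanStep k (σ k) q = ("", [])) := by
  obtain ⟨u, a, ts⟩ := q
  obtain ⟨ka, ga, sa⟩ := pqrStepA_spec dA u a ts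
  have hcont : dA.contains ts = PySem.Set.contains dA.keys ts := by
    rw [PySem.Dict.contains_eq_decide_mem_keys]
    simp [PySem.Set.contains]
  refine ⟨?_, ?_, ?_, ?_⟩
  · rw [ka]
    cases h : dA.contains ts with
    | true =>
      rw [if_pos rfl]
      rw [PySem.Dict.contains_eq_decide_mem_keys] at h
      simp [PySem.Set.add, of_decide_eq_true h]
    | false =>
      rw [if_neg (by simp)]
      rw [PySem.Dict.contains_eq_decide_mem_keys] at h
      simp [PySem.Set.add, of_decide_eq_false h]
  · intro k
    by_cases hkts : k = ts
    · subst hkts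
      rw [sa]
      show pqrValRel _ (if k = k then _ else σ k)
      rw [if_pos rfl]
      cases hB : dA.contains k with
      | false =>
        have hdef : σ k = ("", []) := hfresh k hB
        rw [hdef]
        simp only [Bool.false_eq_true, if_neg (fun hf => False.elim hf)]
        exact pqrInnerVal_rel _ ("", []) u a ⟨rfl, rfl⟩ (fun s hs => by simp at hs)
      | true =>
        simp only [if_true]
        exact pqrInnerVal_rel _ _ u a (hrel k) (hinv k)
    · rw [ga k hkts]
      show pqrValRel _ (if ts = k then _ else σ k)
      rw [if_neg (fun h => hkts h.symm)]
      exact hrel k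
  · intro k s hs
    unfold pqrScanStep at hs
    by_cases hkts : ts = k
    · rw [if_pos hkts] at hs
      by_cases ha : a ≠ ""
      · rw [if_pos ha] at hs
        rcases List.mem_append.mp hs with h | h
        · exact hinv k s h
        · simp only [List.mem_singleton] at h
          subst h; exact ha
      · rw [if_neg ha] at hs
        exact hinv k s hs
    · rw [if_neg hkts] at hs
      exact hinv k s hs
  · intro k hnc
    have hkts : ts ≠ k := by
      intro h; subst h
      have : (pqrStepA dA (u, a, ts)).contains ts = true := by
        rw [PySem.Dict.contains_eq_decide_mem_keys, ka]
        cases h : dA.contains ts with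
        | true =>
          rw [PySem.Dict.contains_eq_decide_mem_keys] at h
          simp [of_decide_eq_true h]
        | false => simp
      rw [this] at hnc; cases hnc
    unfold pqrScanStep
    rw [if_neg hkts]
    apply hfresh
    cases h : dA.contains k with
    | false => rfl
    | true =>
      exfalso
      have : (pqrStepA dA (u, a, ts)).contains k = true := by
        rw [PySem.Dict.contains_eq_decide_mem_keys, ka]
        have hm : k ∈ dA.keys := of_decide_eq_true (by rwa [PySem.Dict.contains_eq_decide_mem_keys] at h)
        cases hc : dA.contains ts <;> simp [hm]
      rw [this] at hnc; cases hnc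

theorem pqr_loop (qrs : List (String × String × String)) :
    ∀ (dA : PySem.Dict String (PySem.Dict String String)) (σ : String → String × List String),
    (∀ k, pqrValRel (dA.getD k PySem.Dict.empty) (σ k)) →
    (∀ k, ∀ s ∈ (σ k).2, s ≠ "") →
    (∀ k, dA.contains k = false → σ k = ("", [])) →
    ((qrs.foldl pqrStepA dA).keys = (qrs.map (fun q => q.2.2)).foldl PySem.Set.add dA.keys) ∧
    (∀ k, pqrValRel ((qrs.foldl pqrStepA dA).getD k PySem.Dict.empty) (qrs.foldl (pqrScanStep k) (σ k))) ∧
    (∀ k, ∀ s ∈ (qrs.foldl (pqrScanStep k) (σ k)).2, s ≠ "") := by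
  induction qrs with
  | nil => intro dA σ h1 h2 h3; exact ⟨rfl, h1, h2⟩
  | cons q rest ih =>
    intro dA σ h1 h2 h3
    obtain ⟨g0, g1, g2, g3⟩ := pqr_step_pres dA σ q h1 h2 h3
    obtain ⟨r0, r1, r2⟩ := ih (pqrStepA dA q) (fun k => pqrScanStep k (σ k) q) g1 g2 g3
    exact ⟨by simpa [g0] using r0, r1, r2⟩

-- ===== VERDICT (by name: the statement is the Claim_ definition above) =====
theorem process_query_results_py_spec : Claim_equal_process_query_results_py := by
  intro qrs if_pillow _
  unfold Spec_process_query_results_py process_query_results_py process_query_results_py_alt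
  obtain ⟨hk, hrel, hinv⟩ := pqr_loop qrs PySem.Dict.empty (fun _ => ("", []))
    (fun k => ⟨rfl, rfl⟩) (fun k s hs => by simp at hs) (fun k _ => rfl)
  have hkeys : (qrs.foldl pqrStepA PySem.Dict.empty).keys
      = PySem.Set.ofList (qrs.map (fun q => q.2.2)) := by
    rw [hk, PySem.Set.ofList_eq_foldl]
    rfl
  show ((PySem.List.sorted (qrs.foldl pqrStepA PySem.Dict.empty).keys (fun x => x) if_pillow).take 6).foldl _ [] = _
  rw [hkeys]
  refine PySem.List.foldl_congr_mem _ _ _ _ ?_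
  intro acc key _
  obtain ⟨h1, h2⟩ := hrel key
  have hiff : (PySem.Str.join " " (qrs.foldl (pqrScanStep key) ("", [])).2 ≠ "")
      ↔ (qrs.foldl (pqrScanStep key) ("", [])).2 ≠ [] :=
    ⟨fun h hc => h (by rw [hc]; exact pqr_join_nil), fun h => pqr_join_ne_empty _ h (hinv key)⟩
  simp only [h1, h2]
  by_cases hA2 : (qrs.foldl (pqrScanStep key) ("", [])).2 = []
  · rw [hA2, pqr_join_nil]
    simp
  · have hj := hiff.mpr hA2
    simp [hA2, hj]
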